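-- pv_equiv track=rewrite | github.com/huqa/project-euler | p29/p29.py | integer_combinations
-- ===== SOURCE A (Python) =====
-- def integer_combinations(a_max, b_max):
--     sequence = []
--     for a in range(2, a_max+1):
--         for b in range(2, b_max+1):
--             x = a ** b
--             if x not in sequence:
--                 sequence.append(x)
--     return len(sequence)
-- ===== SOURCE B (Python) =====
-- def integer_combinations(a_max, b_max):
--     # Materialise all powers, sort once, then count value changes in one adjacent scan.
--     powers = sorted(a ** b for a in range(2, a_max + 1) for b in range(2, b_max + 1))
--     count = 0
--     prev = None
--     for x in powers:
--         if x != prev: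
--             count += 1
--             prev = x
--     return count
-- ===== Notes on version B (the rewrite author's own statement) =====
-- stated objective: faster
-- what changed: Instead of A's incremental dedup-list with a linear membership scan per power, B materialises all powers, sorts them once, and counts distinct values by a single adjacent-difference scan over the sorted list.
import Mathlib
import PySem

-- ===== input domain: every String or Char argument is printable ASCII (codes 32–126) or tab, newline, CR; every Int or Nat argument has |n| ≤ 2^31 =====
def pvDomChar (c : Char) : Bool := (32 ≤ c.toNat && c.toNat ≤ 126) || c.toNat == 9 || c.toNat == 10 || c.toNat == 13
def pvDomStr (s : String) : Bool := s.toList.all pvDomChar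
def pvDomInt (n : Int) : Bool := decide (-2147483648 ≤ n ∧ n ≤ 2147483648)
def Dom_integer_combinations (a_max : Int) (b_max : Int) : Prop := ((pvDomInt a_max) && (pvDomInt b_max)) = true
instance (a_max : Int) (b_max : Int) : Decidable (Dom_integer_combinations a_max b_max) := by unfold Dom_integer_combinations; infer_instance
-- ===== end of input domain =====

-- B sorts all the powers once and counts distinct values by a single adjacent scan,
-- instead of A's incremental dedup list with a linear membership scan per power.

-- ===== PORT A =====
-- literal port of A: a dedup list built by 'if x not in sequence: sequence.append(x)'
def integer_combinations (a_max : Int) (b_max : Int) : Int :=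
  let sequence : List Int :=
    (PySem.List.pyRange 2 (a_max + 1) 1).foldl (fun sequence a =>
      (PySem.List.pyRange 2 (b_max + 1) 1).foldl (fun sequence b =>
        let x := a ^ b.toNat
        if sequence.contains x then sequence else sequence ++ [x]) sequence) []
  (sequence.length : Int)

-- ===== PORT B =====
-- literal port of B: sort the list of all powers, then scan counting changes of value
def integer_combinations_alt (a_max : Int) (b_max : Int) : Int :=
  let powers : List Int :=
    PySem.List.sorted
      ((PySem.List.pyRange 2 (a_max + 1) 1).flatMap (fun a =>
        (PySem.List.pyRange 2 (b_max + 1) 1).map (fun b => a ^ b.toNat)))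
      (fun x => x) false
  (powers.foldl (fun (p : Int × Option Int) x =>
      if some x = p.2 then p else (p.1 + 1, some x)) (0, none)).1

-- ===== PRECONDITION & SPEC =====
def Spec_integer_combinations (a_max : Int) (b_max : Int) (out : Int) : Prop := out = integer_combinations_alt a_max b_max
instance (a_max : Int) (b_max : Int) (out : Int) : Decidable (Spec_integer_combinations a_max b_max out) := by unfold Spec_integer_combinations; infer_instance

-- ===== CLAIM (what is proved, stated in full; the proofs are below) =====
def Claim_equal_integer_combinations : Prop := ∀ (a_max : Int) (b_max : Int), Dom_integer_combinations a_max b_max → Spec_integer_combinations a_max b_max (integer_combinations a_max b_max)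

-- ===== LEMMAS AND PROOFS =====

-- A's dedup fold: the accumulator stays duplicate-free and holds exactly the values seen
theorem pv_dedup_fold (L : List Int) : ∀ (acc : List Int), acc.Nodup →
    (L.foldl (fun s x => if s.contains x then s else s ++ [x]) acc).Nodup ∧
    (L.foldl (fun s x => if s.contains x then s else s ++ [x]) acc).toFinset
      = acc.toFinset ∪ L.toFinset := by
  induction L with
  | nil => intro acc h; simpa using h
  | cons x rest ih =>
      intro acc h
      simp only [List.foldl_cons]
      by_cases hx : acc.contains x
      · rw [if_pos hx]
        obtain ⟨h1, h2⟩ := ih acc h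
        refine ⟨h1, ?_⟩
        rw [h2, List.toFinset_cons]
        have : x ∈ acc.toFinset := by simpa [List.contains_iff_mem] using hx
        rw [Finset.union_insert, Finset.insert_eq_self.2 (Finset.mem_union_left _ this)]
      · rw [if_neg hx]
        have hnx : x ∉ acc := by simpa [List.contains_iff_mem] using hx
        obtain ⟨h1, h2⟩ := ih (acc ++ [x]) (h.append (List.nodup_singleton x)
          (by simpa [List.disjoint_singleton] using hnx))
        refine ⟨h1, ?_⟩
        rw [h2]
        ext y
        simp [or_comm]

-- B's scan from a previous value p: with a sorted tail all ≥ p, it adds the number of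
-- distinct values other than p
theorem pv_scan_some (xs : List Int) : xs.Pairwise (· ≤ ·) →
    ∀ (c : Int) (p : Int), (∀ y ∈ xs, p ≤ y) →
    (xs.foldl (fun (q : Int × Option Int) x =>
        if some x = q.2 then q else (q.1 + 1, some x)) (c, some p)).1
      = c + ((xs.toFinset \ {p}).card : Int) := by
  induction xs with
  | nil => intro _ c p _; simp
  | cons x rest ih =>
      intro hp c p hge
      have hst : rest.Pairwise (· ≤ ·) := hp.of_cons
      have hxle : ∀ y ∈ rest, x ≤ y := fun y hy => List.rel_of_pairwise_cons hp hy
      simp only [List.foldl_cons]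
      by_cases hxp : x = p
      · subst hxp
        rw [if_pos rfl]
        rw [ih hst c x hxle]
        congr 2
        rw [List.toFinset_cons, Finset.insert_sdiff_of_mem _ (by simp)]
      · rw [if_neg (by simpa using hxp)]
        rw [ih hst (c + 1) x hxle]
        have hpx : p < x := lt_of_le_of_ne (hge x List.mem_cons_self) (Ne.symm hxp)
        have h1 : (x :: rest).toFinset \ {p} = insert x (rest.toFinset \ {x}) := by
          ext y
          simp only [Finset.mem_sdiff, List.mem_toFinset, List.mem_cons,
            Finset.mem_insert, Finset.mem_singleton]
          constructor
          · rintro ⟨hy | hy, _⟩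
            · exact Or.inl hy
            · by_cases hyx : y = x
              · exact Or.inl hyx
              · exact Or.inr ⟨hy, hyx⟩
          · rintro (hy | ⟨hy, hyx⟩)
            · exact ⟨Or.inl hy, by rw [hy]; exact hxp⟩
            · refine ⟨Or.inr hy, ?_⟩
              intro hyp
              subst hyp
              exact absurd (hxle y hy) (not_le.2 hpx)
        have hxn : x ∉ rest.toFinset \ {x} := by simp
        rw [h1, Finset.card_insert_of_notMem hxn]
        push_cast
        ring

-- B's whole scan (starting from prev = None) counts the distinct values of a sorted list
theorem pv_scan_none (xs : List Int) (hp : xs.Pairwise (· ≤ ·)) :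
    (xs.foldl (fun (q : Int × Option Int) x =>
        if some x = q.2 then q else (q.1 + 1, some x)) (0, none)).1
      = (xs.toFinset.card : Int) := by
  cases xs with
  | nil => simp
  | cons x rest =>
      simp only [List.foldl_cons, reduceCtorEq, reduceIte]
      rw [pv_scan_some rest hp.of_cons (0 + 1) x (fun y hy => List.rel_of_pairwise_cons hp hy)]
      have hxn : x ∉ rest.toFinset \ {x} := by simp
      have : (x :: rest).toFinset = insert x (rest.toFinset \ {x}) := by
        ext y; by_cases hy : y = x <;> simp [hy]
      rw [this, Finset.card_insert_of_notMem hxn]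
      push_cast
      ring

-- A's nested fold is the dedup fold over the flat list of all powers
theorem pv_A_card (a_max b_max : Int) :
    integer_combinations a_max b_max =
      (((PySem.List.pyRange 2 (a_max + 1) 1).flatMap (fun a =>
        (PySem.List.pyRange 2 (b_max + 1) 1).map (fun b => a ^ b.toNat))).toFinset.card : Int) := by
  have key : ∀ L : List Int,
      ((L.foldl (fun s x => if s.contains x then s else s ++ [x]) []).length : Int)
        = (L.toFinset.card : Int) := fun L => by
    obtain ⟨h1, h2⟩ := pv_dedup_fold L [] List.nodup_nil
    rw [← List.toFinset_card_of_nodup h1, h2]; simp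
  show ((((PySem.List.pyRange 2 (a_max + 1) 1).foldl (fun sequence a =>
      (PySem.List.pyRange 2 (b_max + 1) 1).foldl (fun sequence b =>
        if sequence.contains (a ^ b.toNat) then sequence
        else sequence ++ [a ^ b.toNat]) sequence) []).length : Int) = _)
  rw [← key]
  have hfun : (fun (s : List Int) (a : Int) =>
        (PySem.List.pyRange 2 (b_max + 1) 1).foldl (fun s b =>
          if s.contains (a ^ b.toNat) then s else s ++ [a ^ b.toNat]) s)
      = (fun (s : List Int) (a : Int) =>
        ((PySem.List.pyRange 2 (b_max + 1) 1).map (fun b => a ^ b.toNat)).foldl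
          (fun s x => if s.contains x then s else s ++ [x]) s) := by
    funext s a
    rw [List.foldl_map]
  rw [List.foldl_flatMap, hfun]

-- ===== VERDICT (by name: the statement is the Claim_ definition above) =====
theorem integer_combinations_spec : Claim_equal_integer_combinations := by
  intro a_max b_max _
  unfold Spec_integer_combinations
  rw [pv_A_card]
  unfold integer_combinations_alt
  rw [pv_scan_none _ (by simpa using PySem.List.sorted_pairwise _ (fun x => x))]
  congr 2
  exact Finset.ext fun y => by
    simp [List.mem_toFinset, (PySem.List.sorted_perm _ _ _).mem_iff]
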